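-- pv_equiv track=rewrite | github.com/shujatoor/blockworldproblem | blockworldAgent.py | calc_state_heuristic
-- ===== SOURCE A (Python) =====
-- def calc_state_heuristic(state,goal):
--
--     h_counter = 0
--     heu = 0
--     unmatch = 0
--
--
--     for lst_state in state:
--         for lst_goal in goal:
--
--             match_index_of_state = [i for i, el in enumerate(lst_state) if el in lst_goal]
--
--             if lst_state!= lst_goal[:len(match_index_of_state)]:
--
--                 unmatch+=1
--
--             elif lst_state == lst_goal[:len(match_index_of_state)]:
--
--                 unmatch-=1
--
--         if unmatch == len(goal):
--
--             h_counter = -1*sum(range(len(lst_state)))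
--             heu  = heu +  h_counter
--             unmatch = 0
--
--         elif unmatch < len(goal):
--
--             h_counter = sum(range(len(lst_state)))
--             heu  = heu +  h_counter
--             unmatch = 0
--
--
--
--     return heu
-- ===== SOURCE B (Python) =====
-- def calc_state_heuristic(state, goal):
--     # Index all prefixes of the goal stacks once; a state stack contributes
--     # +n(n-1)/2 iff it is a prefix of some goal stack, else -n(n-1)/2.
--     prefixes = set()
--     for g in goal:
--         t = ()
--         prefixes.add(t)
--         for el in g:
--             t = t + (el,)
--             prefixes.add(t)
--     heu = 0
--     for s in state:
--         n = len(s)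
--         tri = n * (n - 1) // 2
--         heu += tri if tuple(s) in prefixes else -tri
--     return heu
-- ===== Notes on version B (the rewrite author's own statement) =====
-- stated objective: faster
-- what changed: Instead of rescanning all goal lists per state list with a per-pair membership count and an unmatch accumulator, B precomputes a hash set of all prefixes of the goal stacks once and scores each state list by a single set lookup (the per-pair test is equivalent to 'state list is a prefix of that goal list'), with sum(range(n)) replaced by the closed form n*(n-1)//2.
import Mathlib
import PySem

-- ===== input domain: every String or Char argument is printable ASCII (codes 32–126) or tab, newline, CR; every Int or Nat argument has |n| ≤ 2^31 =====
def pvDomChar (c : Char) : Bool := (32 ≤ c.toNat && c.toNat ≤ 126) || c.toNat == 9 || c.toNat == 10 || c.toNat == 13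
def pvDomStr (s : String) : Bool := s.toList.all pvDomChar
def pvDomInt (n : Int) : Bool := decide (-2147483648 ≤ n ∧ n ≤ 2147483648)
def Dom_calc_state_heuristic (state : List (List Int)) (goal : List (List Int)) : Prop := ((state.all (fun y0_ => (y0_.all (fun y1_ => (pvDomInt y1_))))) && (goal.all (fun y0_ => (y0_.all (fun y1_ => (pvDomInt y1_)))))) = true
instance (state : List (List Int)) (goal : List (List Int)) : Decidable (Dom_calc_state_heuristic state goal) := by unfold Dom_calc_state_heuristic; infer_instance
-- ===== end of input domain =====

-- B indexes every prefix of every goal stack in a set built once, then scores each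
-- state stack by one set lookup (A rescans all goals with a per-pair membership
-- count); sum(range(n)) becomes the closed form n*(n-1)//2. Objective: faster.

-- ===== PORT A =====
-- inner 'for lst_goal in goal' loop: updates unmatch
def pvInnerA (ls : List Int) (goal : List (List Int)) (unmatch : Int) : Int :=
  goal.foldl (fun u lg =>
    -- match_index_of_state = [i for i, el in enumerate(lst_state) if el in lst_goal]
    let mis := (PySem.List.enumerate ls 0).filter (fun p => decide (p.2 ∈ lg))
    -- lst_goal[:len(mis)]: the slice bound is a length, hence ≥ 0, so it is List.take
    if ls ≠ lg.take mis.length then u + 1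
    else if ls = lg.take mis.length then u - 1
    else u) unmatch

def calc_state_heuristic (state : List (List Int)) (goal : List (List Int)) : Int :=
  (state.foldl (fun (p : Int × Int) ls =>
    let unmatch := pvInnerA ls goal p.2
    if unmatch = (goal.length : Int) then
      -- h_counter = -1*sum(range(len(lst_state)))
      (p.1 + (-1) * (PySem.List.pyRange 0 (ls.length : Int) 1).sum, 0)
    else if unmatch < (goal.length : Int) then
      (p.1 + (PySem.List.pyRange 0 (ls.length : Int) 1).sum, 0)
    else (p.1, unmatch)) ((0 : Int), (0 : Int))).1

-- ===== PORT B =====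
-- 'for g in goal: t = (); add; for el in g: t = t + (el,); add' — all prefixes of the goal stacks
def pvPrefixes (goal : List (List Int)) : PySem.Set (List Int) :=
  goal.foldl (fun ps g =>
    (g.foldl (fun (pt : PySem.Set (List Int) × List Int) el =>
        let t := pt.2 ++ [el]
        (PySem.Set.add pt.1 t, t))
      (PySem.Set.add ps [], [])).1)
    PySem.Set.empty

def calc_state_heuristic_alt (state : List (List Int)) (goal : List (List Int)) : Int :=
  let prefixes := pvPrefixes goal
  state.foldl (fun heu s =>
    let n : Int := (s.length : Int)
    let tri := PySem.Int.floordiv (n * (n - 1)) 2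
    heu + (if PySem.Set.contains prefixes s then tri else -tri)) 0

-- ===== PRECONDITION & SPEC =====
def Spec_calc_state_heuristic (state : List (List Int)) (goal : List (List Int)) (out : Int) : Prop := out = calc_state_heuristic_alt state goal
instance (state : List (List Int)) (goal : List (List Int)) (out : Int) : Decidable (Spec_calc_state_heuristic state goal out) := by unfold Spec_calc_state_heuristic; infer_instance

-- ===== CLAIM (what is proved, stated in full; the proofs are below) =====
def Claim_equal_calc_state_heuristic : Prop := ∀ (state : List (List Int)) (goal : List (List Int)), Dom_calc_state_heuristic state goal → Spec_calc_state_heuristic state goal (calc_state_heuristic state goal)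

-- ===== LEMMAS AND PROOFS =====

-- A's filtered-enumerate length is a countP
theorem pv_mis_len (ls lg : List Int) : ∀ s : Int,
    ((PySem.List.enumerate ls s).filter (fun p => decide (p.2 ∈ lg))).length
      = ls.countP (fun el => decide (el ∈ lg)) := by
  induction ls with
  | nil => intro s; simp [PySem.List.enumerate_nil]
  | cons x xs ih =>
      intro s
      rw [PySem.List.enumerate_cons]
      by_cases hx : x ∈ lg <;> simp [hx, ih (s + 1)]

-- A's per-pair condition 's == g[:count]' is exactly 's is a prefix of g'
theorem pv_match_iff_prefix (s g : List Int) :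
    s = g.take (s.countP (fun el => decide (el ∈ g))) ↔ s <+: g := by
  constructor
  · intro h; exact h ▸ List.take_prefix _ g
  · intro h
    have hcnt : s.countP (fun el => decide (el ∈ g)) = s.length := by
      rw [List.countP_eq_length]
      intro a ha; exact decide_eq_true (h.subset ha)
    rw [hcnt, ← List.prefix_iff_eq_take]; exact h

-- the inner loop from u computes u + |goal| - 2 * (number of goals s is a prefix of)
theorem pv_inner (ls : List Int) (gs : List (List Int)) : ∀ u : Int,
    pvInnerA ls gs u
      = u + (gs.length : Int) - 2 * (gs.countP (fun lg => decide (ls <+: lg)) : Int) := by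
  induction gs with
  | nil => intro u; simp [pvInnerA]
  | cons g gs ih =>
      intro u
      have hstep : pvInnerA ls (g :: gs) u
          = pvInnerA ls gs (if ls <+: g then u - 1 else u + 1) := by
        simp only [pvInnerA, List.foldl_cons, pv_mis_len]
        by_cases h : ls = g.take (ls.countP (fun el => decide (el ∈ g)))
        · rw [if_neg (not_not_intro h), if_pos h, if_pos ((pv_match_iff_prefix ls g).mp h)]
        · rw [if_pos h, if_neg (fun hp => h ((pv_match_iff_prefix ls g).mpr hp))]
      rw [hstep, ih]
      by_cases h : ls <+: g
      · rw [if_pos h]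
        simp only [List.countP_cons, decide_eq_true h, if_true, List.length_cons]
        push_cast; ring
      · rw [if_neg h]
        simp only [List.countP_cons, decide_eq_false h, List.length_cons]
        push_cast; ring

-- 2 * sum(range(n)) = n*(n-1)
theorem pv_twice_sum : ∀ n : Nat,
    2 * (PySem.List.pyRange 0 (n : Int) 1).sum = (n : Int) * ((n : Int) - 1) := by
  intro n
  induction n with
  | zero => simp [PySem.List.pyRange_one_eq_nil]
  | succ m ih =>
      rw [show ((m + 1 : Nat) : Int) = (m : Int) + 1 by push_cast; ring,
          PySem.List.pyRange_one_succ_right (by positivity)]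
      simp only [List.sum_append, List.sum_cons, List.sum_nil]
      nlinarith [ih]

-- hence A's sum(range(n)) equals B's n*(n-1)//2
theorem pv_sum_eq_tri (n : Nat) :
    (PySem.List.pyRange 0 (n : Int) 1).sum
      = PySem.Int.floordiv ((n : Int) * ((n : Int) - 1)) 2 := by
  have h := pv_twice_sum n
  exact ((PySem.Int.floordiv_eq_iff_of_pos (by norm_num)).2 ⟨by linarith, by linarith⟩).symm

-- membership after B's inner fold over one goal stack, generalized over the start set and prefix
theorem pv_inner_fold_mem (g : List Int) : ∀ (ps : PySem.Set (List Int)) (t x : List Int),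
    (x ∈ (g.foldl (fun (pt : PySem.Set (List Int) × List Int) el =>
        let t := pt.2 ++ [el]
        (PySem.Set.add pt.1 t, t)) (ps, t)).1)
      ↔ x ∈ ps ∨ ∃ p, p <+: g ∧ p ≠ [] ∧ x = t ++ p := by
  induction g with
  | nil => intro ps t x; simp
  | cons el g ih =>
      intro ps t x
      simp only [List.foldl_cons]
      rw [ih]
      rw [PySem.Set.mem_add]
      constructor
      · rintro ((h | h) | ⟨p, hp, hne, hx⟩)
        · exact Or.inl h
        · exact Or.inr ⟨[el], ⟨g, by simp⟩, by simp, by simpa using h⟩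
        · exact Or.inr ⟨el :: p, by simpa using hp, by simp, by simpa using hx⟩
      · rintro (h | ⟨p, hp, hne, hx⟩)
        · exact Or.inl (Or.inl h)
        · match p, hne with
          | q :: p', _ =>
            obtain ⟨r, hr⟩ := hp
            cases hr
            rcases List.eq_nil_or_concat' p' with rfl | _
            · exact Or.inl (Or.inr (by simpa using hx))
            · exact Or.inr ⟨p', ⟨r, rfl⟩, by rintro rfl; simp_all, by simpa using hx⟩

-- membership in the prefix set: x is a prefix of some goal stack
theorem pv_prefixes_mem (goal : List (List Int)) : ∀ (ps : PySem.Set (List Int)) (x : List Int),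
    (x ∈ goal.foldl (fun ps g =>
      (g.foldl (fun (pt : PySem.Set (List Int) × List Int) el =>
          let t := pt.2 ++ [el]
          (PySem.Set.add pt.1 t, t)) (PySem.Set.add ps [], [])).1) ps)
      ↔ x ∈ ps ∨ ∃ g ∈ goal, x <+: g := by
  induction goal with
  | nil => intro ps x; simp
  | cons g goal ih =>
      intro ps x
      simp only [List.foldl_cons]
      rw [ih, pv_inner_fold_mem, PySem.Set.mem_add]
      constructor
      · rintro (((h | h) | ⟨p, hp, _, hx⟩) | ⟨g', hg', hx⟩)
        · exact Or.inl h
        · exact Or.inr ⟨g, by simp, by simp [h]⟩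
        · exact Or.inr ⟨g, by simp, by simpa [hx] using hp⟩
        · exact Or.inr ⟨g', by simp [hg'], hx⟩
      · rintro (h | ⟨g', hg', hx⟩)
        · exact Or.inl (Or.inl (Or.inl h))
        · rcases List.mem_cons.mp hg' with rfl | hg'
          · rcases List.eq_nil_or_concat' x with rfl | _
            · exact Or.inl (Or.inl (Or.inr rfl))
            · exact Or.inl (Or.inr ⟨x, hx, by rintro rfl; simp_all, by simp⟩)
          · exact Or.inr ⟨g', hg', hx⟩

-- B's lookup decides exactly "s is a prefix of some goal stack"
theorem pv_contains (goal : List (List Int)) (s : List Int) :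
    PySem.Set.contains (pvPrefixes goal) s = true ↔ ∃ g ∈ goal, s <+: g := by
  rw [PySem.Set.contains_iff]
  show s ∈ pvPrefixes goal ↔ _
  unfold pvPrefixes
  rw [pv_prefixes_mem]
  simp [PySem.Set.empty]

-- outer loop, generalized over the accumulated heuristic (A's unmatch is 0 at
-- the start of every outer iteration); stated zeta-reduced (lets expanded)
theorem pv_outer (goal : List (List Int)) : ∀ (st : List (List Int)) (heu : Int),
    (st.foldl (fun (p : Int × Int) ls =>
      if pvInnerA ls goal p.2 = (goal.length : Int) then
        (p.1 + (-1) * (PySem.List.pyRange 0 (ls.length : Int) 1).sum, 0)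
      else if pvInnerA ls goal p.2 < (goal.length : Int) then
        (p.1 + (PySem.List.pyRange 0 (ls.length : Int) 1).sum, 0)
      else (p.1, pvInnerA ls goal p.2)) ((heu : Int), (0 : Int))).1
    = st.foldl (fun heu s =>
        heu + (if PySem.Set.contains (pvPrefixes goal) s then
          PySem.Int.floordiv ((s.length : Int) * ((s.length : Int) - 1)) 2
        else -(PySem.Int.floordiv ((s.length : Int) * ((s.length : Int) - 1)) 2))) heu := by
  intro st
  induction st with
  | nil => intro heu; rfl
  | cons ls rest ih =>
      intro heu
      simp only [List.foldl_cons]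
      set p := fun g : List Int => decide (ls <+: g) with hp
      have hin : pvInnerA ls goal 0 = (goal.length : Int) - 2 * (goal.countP p : Int) := by
        rw [pv_inner]; ring
      by_cases hm : goal.countP p = 0
      · -- no goal stack has ls as a prefix: A takes the unmatch = len(goal) branch, B's lookup misses
        have hcf : PySem.Set.contains (pvPrefixes goal) ls = false := by
          cases hcv : PySem.Set.contains (pvPrefixes goal) ls with
          | false => rfl
          | true =>
              obtain ⟨g, hg, hp'⟩ := (pv_contains goal ls).mp hcv
              have := List.countP_eq_zero.mp hm g hg
              simp [hp, hp'] at this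
        have h1 : pvInnerA ls goal (((heu : Int), (0 : Int)) : Int × Int).2 = (goal.length : Int) := by
          rw [hin, hm]; simp
        rw [h1, if_pos rfl, pv_sum_eq_tri ls.length, hcf]
        simp only [Bool.false_eq_true, if_false]
        rw [show heu + -1 * PySem.Int.floordiv ((ls.length : Int) * ((ls.length : Int) - 1)) 2
              = heu + -(PySem.Int.floordiv ((ls.length : Int) * ((ls.length : Int) - 1)) 2) by ring]
        exact ih _
      · -- some goal stack has ls as a prefix: unmatch < len(goal), B's lookup hits
        have hct : PySem.Set.contains (pvPrefixes goal) ls = true := by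
          obtain ⟨g, hg, hp'⟩ := List.countP_pos_iff.mp (Nat.pos_of_ne_zero hm)
          exact (pv_contains goal ls).mpr ⟨g, hg, by simpa [hp] using hp'⟩
        have hcpos : 0 < goal.countP p := Nat.pos_of_ne_zero hm
        have hle : (goal.countP p : Int) ≤ (goal.length : Int) := by
          exact_mod_cast List.countP_le_length
        have h1 : pvInnerA ls goal (((heu : Int), (0 : Int)) : Int × Int).2
            = (goal.length : Int) - 2 * (goal.countP p : Int) := hin
        have hne : (goal.length : Int) - 2 * (goal.countP p : Int) ≠ (goal.length : Int) := by omega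
        have hlt : (goal.length : Int) - 2 * (goal.countP p : Int) < (goal.length : Int) := by omega
        rw [h1, if_neg hne, if_pos hlt, pv_sum_eq_tri ls.length, hct, if_pos rfl]
        exact ih _

-- ===== VERDICT (by name: the statement is the Claim_ definition above) =====
theorem calc_state_heuristic_spec : Claim_equal_calc_state_heuristic := by
  intro state goal _
  unfold Spec_calc_state_heuristic calc_state_heuristic calc_state_heuristic_alt
  exact pv_outer goal state 0
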